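-- pv_equiv track=rewrite | github.com/willmtemple/XECryptor | xecryptor.py | resolve_enc_array
-- ===== SOURCE A (Python) =====
-- def resolve_enc_array(enc_array):
--
--     return_list = []
--     counter = 0
--     running_total = 0
--
--     for value in enc_array:
--
--         #The leading '.' at the beginning  of XECrypted text causes int() to throw a ValueError.
--         #Since the leading '.' is insignificant to the encryption, we may safely pass that case.
--         try:
--             running_total += int(value)
--         except ValueError:
--             counter -= 1
--
--         counter += 1
--
--         if counter == 3:
--             counter = 0
--             return_list.append(running_total)
--             running_total = 0
--
--     return return_list
-- ===== SOURCE B (Python) =====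
-- def resolve_enc_array(enc_array):
--     nums = []
--     for value in enc_array:
--         try:
--             nums.append(int(value))
--         except ValueError:
--             pass
--     return [sum(nums[3 * i:3 * i + 3]) for i in range(len(nums) // 3)]
-- ===== Notes on version B (the rewrite author's own statement) =====
-- stated objective: simpler
-- what changed: Replaces A's counter/running_total state machine with a two-phase decomposition: first collect the successfully parsed ints, then sum complete triples by index-chunking the collected list.
import Mathlib
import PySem

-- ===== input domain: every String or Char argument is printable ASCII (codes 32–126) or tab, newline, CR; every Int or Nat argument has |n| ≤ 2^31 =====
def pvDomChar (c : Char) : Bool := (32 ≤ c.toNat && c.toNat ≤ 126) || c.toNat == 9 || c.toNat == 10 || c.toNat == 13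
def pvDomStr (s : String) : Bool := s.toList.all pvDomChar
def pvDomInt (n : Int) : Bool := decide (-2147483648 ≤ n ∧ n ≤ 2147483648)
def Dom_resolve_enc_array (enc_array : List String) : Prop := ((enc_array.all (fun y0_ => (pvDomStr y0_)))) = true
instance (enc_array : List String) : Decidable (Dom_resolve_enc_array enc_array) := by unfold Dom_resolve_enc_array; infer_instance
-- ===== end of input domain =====

-- B replaces A's counter/running_total state machine with a two-phase decomposition
-- (collect parsed ints, then sum complete triples by index-chunking); objective: simpler.

-- ===== PORT A =====
-- A's loop: state (return_list, counter, running_total); int(value) = PySem.Int.ofStr?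
-- (ValueError = none).
def resolve_enc_array (enc_array : List String) : List Int :=
  let st := enc_array.foldl
    (fun (s : List Int × Int × Int) value =>
      let return_list := s.1
      let counter := s.2.1
      let running_total := s.2.2
      let (counter, running_total) :=
        match PySem.Int.ofStr? value with
        | some n => (counter, running_total + n)
        | none => (counter - 1, running_total)
      let counter := counter + 1
      if counter == 3 then (return_list ++ [running_total], 0, 0)
      else (return_list, counter, running_total))
    ([], 0, 0)
  st.1

-- ===== PORT B =====
-- B's first loop: append int(value) to nums, skipping ValueError; then the
-- comprehension [sum(nums[3*i:3*i+3]) for i in range(len(nums)//3)].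
def resolve_enc_array_alt (enc_array : List String) : List Int :=
  let nums := enc_array.foldl
    (fun (nums : List Int) value =>
      match PySem.Int.ofStr? value with
      | some n => nums ++ [n]
      | none => nums) []
  (PySem.List.pyRange 0 (PySem.Int.floordiv (nums.length : Int) 3) 1).map
    (fun i => (PySem.List.slice nums (some (3 * i)) (some (3 * i + 3))).sum)

-- ===== PRECONDITION & SPEC =====
def Spec_resolve_enc_array (enc_array : List String) (out : List Int) : Prop := out = resolve_enc_array_alt enc_array
instance (enc_array : List String) (out : List Int) : Decidable (Spec_resolve_enc_array enc_array out) := by unfold Spec_resolve_enc_array; infer_instance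

-- ===== CLAIM (what is proved, stated in full; the proofs are below) =====
def Claim_equal_resolve_enc_array : Prop := ∀ (enc_array : List String), Dom_resolve_enc_array enc_array → Spec_resolve_enc_array enc_array (resolve_enc_array enc_array)

-- ===== LEMMAS AND PROOFS =====

-- A's step restricted to successfully parsed values.
def pvStepA (s : List Int × Int × Int) (n : Int) : List Int × Int × Int :=
  if s.2.1 + 1 == 3 then (s.1 ++ [s.2.2 + n], 0, 0)
  else (s.1, s.2.1 + 1, s.2.2 + n)

-- chunk-sum specification
def pvComp (nums : List Int) : List Int :=
  (List.range (nums.length / 3)).map (fun k => ((nums.drop (3 * k)).take 3).sum)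

-- A's fold over strings equals pvStepA folded over the parsed values.
theorem pvFoldA_eq (xs : List String) :
    ∀ (rl : List Int) (c t : Int), 0 ≤ c → c < 3 →
    xs.foldl
      (fun (s : List Int × Int × Int) value =>
        let return_list := s.1
        let counter := s.2.1
        let running_total := s.2.2
        let (counter, running_total) :=
          match PySem.Int.ofStr? value with
          | some n => (counter, running_total + n)
          | none => (counter - 1, running_total)
        let counter := counter + 1
        if counter == 3 then (return_list ++ [running_total], 0, 0)
        else (return_list, counter, running_total))
      (rl, c, t)
    = (xs.filterMap PySem.Int.ofStr?).foldl pvStepA (rl, c, t) := by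
  induction xs with
  | nil => intro rl c t h0 h3; rfl
  | cons x xs ih =>
    intro rl c t h0 h3
    simp only [List.foldl_cons, List.filterMap_cons]
    cases hp : PySem.Int.ofStr? x with
    | none =>
      have hne : ((c - 1 + 1 : Int) == 3) = false := by
        simp; omega
      simp only [hne]
      have : (c - 1 + 1 : Int) = c := by omega
      rw [this]
      exact ih rl c t h0 h3
    | some n =>
      simp only [List.foldl_cons]
      by_cases h : (c + 1 : Int) = 3
      · have hb : ((c + 1 : Int) == 3) = true := by simp [h]
        simp only [if_true, pvStepA, hb]
        exact ih _ 0 0 (by omega) (by omega)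
      · have hb : ((c + 1 : Int) == 3) = false := by simp [h]
        simp only [hb, if_false, Bool.false_eq_true, pvStepA]
        exact ih rl (c + 1) (t + n) (by omega) (by omega)

theorem pvComp_cons3 (a b c : Int) (rest : List Int) :
    pvComp (a :: b :: c :: rest) = (a + b + c) :: pvComp rest := by
  unfold pvComp
  have hlen : (a :: b :: c :: rest).length / 3 = rest.length / 3 + 1 := by
    simp [List.length_cons]; omega
  rw [hlen, List.range_succ_eq_map]
  simp only [List.map_cons, List.map_map]
  congr 1
  · simp; ring

-- the state machine over triples equals the chunk-sum comprehension
theorem pvChunk (nums : List Int) (rl : List Int) :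
    (nums.foldl pvStepA (rl, 0, 0)).1 = rl ++ pvComp nums := by
  match nums with
  | [] => simp [pvComp]
  | [a] => simp [pvStepA, pvComp]
  | [a, b] => simp [pvStepA, pvComp]
  | a :: b :: c :: rest =>
    have ih := pvChunk rest (rl ++ [a + b + c])
    simp only [List.foldl_cons, pvStepA] at ih ⊢
    norm_num at ih ⊢
    rw [pvComp_cons3]
    simpa using ih
termination_by nums.length

-- B's collecting loop equals filterMap.
theorem pvAltNums (xs : List String) (acc : List Int) :
    xs.foldl
      (fun (nums : List Int) value =>
        match PySem.Int.ofStr? value with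
        | some n => nums ++ [n]
        | none => nums) acc
    = acc ++ xs.filterMap PySem.Int.ofStr? := by
  induction xs generalizing acc with
  | nil => simp
  | cons x xs ih =>
    simp only [List.foldl_cons, List.filterMap_cons]
    cases hp : PySem.Int.ofStr? x with
    | none => simp [ih]
    | some n => simp [ih]

-- B's slice comprehension equals the chunk-sum specification.
theorem pvAltComp (nums : List Int) :
    (PySem.List.pyRange 0 (PySem.Int.floordiv (nums.length : Int) 3) 1).map
      (fun i => (PySem.List.slice nums (some (3 * i)) (some (3 * i + 3))).sum)
    = pvComp nums := by
  have h3 : (3 : Int) = ((3 : Nat) : Int) := by norm_num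
  rw [show PySem.Int.floordiv (nums.length : Int) 3 = ((nums.length / 3 : Nat) : Int) from by
        rw [h3]; exact_mod_cast PySem.Int.floordiv_natCast nums.length 3]
  rw [PySem.List.pyRange_zero_natCast]
  rw [List.map_map]
  unfold pvComp
  apply List.map_congr_left
  intro k _
  simp only [Function.comp_apply]
  have hj : (3 : Int) * (k : Int) = ((3 * k : Nat) : Int) := by push_cast; ring
  rw [hj, h3, PySem.List.slice_natCast_add]

-- ===== VERDICT (by name: the statement is the Claim_ definition above) =====
theorem resolve_enc_array_spec : Claim_equal_resolve_enc_array := by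
  intro enc _
  unfold Spec_resolve_enc_array resolve_enc_array resolve_enc_array_alt
  simp only []
  rw [pvFoldA_eq enc [] 0 0 le_rfl (by norm_num), pvChunk, pvAltNums, pvAltComp]
  simp
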